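-- pv_equiv track=rewrite | github.com/goncalo-rodrigues/DroidCipher | Python/FirstConection.py | add_left_zeros
-- ===== SOURCE A (Python) =====
-- def add_left_zeros(mac):
--     size = len(mac)
--     result = ""
--
--     if size != 17:
--         n_chars = 0
--         for i in range(size - 1, -1, -1):
--             if ord(mac[i]) == ord(':'):
--                 while n_chars < 2:
--                     result = "0" + result
--                     n_chars += 1
--                 n_chars = 0
--             else:
--                 n_chars += 1
--             result = mac[i] + result
--         if n_chars != 2:
--             while n_chars < 2:
--                 result = "0" + result
--                 n_chars += 1
--         return result
--     return mac
-- ===== SOURCE B (Python) =====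
-- def add_left_zeros(mac):
--     if len(mac) == 17:
--         return mac
--     return ":".join(seg if len(seg) >= 2 else "0" * (2 - len(seg)) + seg
--                     for seg in mac.split(":"))
-- ===== Notes on version B (the rewrite author's own statement) =====
-- stated objective: faster
-- what changed: Replaces A's backward character-by-character scan with a zero-padding counter, which rebuilds the result by repeated string prepending, by an idiomatic split-on-separator / pad-each-segment-to-two / join (keeping the length-17 early return).
import Mathlib
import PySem

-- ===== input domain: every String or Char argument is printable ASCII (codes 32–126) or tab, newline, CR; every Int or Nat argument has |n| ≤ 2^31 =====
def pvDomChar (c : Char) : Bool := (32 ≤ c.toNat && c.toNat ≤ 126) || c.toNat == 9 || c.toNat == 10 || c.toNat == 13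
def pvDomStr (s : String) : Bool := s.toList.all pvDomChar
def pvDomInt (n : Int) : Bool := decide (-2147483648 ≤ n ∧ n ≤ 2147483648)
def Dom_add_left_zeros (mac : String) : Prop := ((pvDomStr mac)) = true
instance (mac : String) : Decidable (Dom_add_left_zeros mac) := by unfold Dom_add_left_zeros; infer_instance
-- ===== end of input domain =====

-- B replaces A's backward character scan (manual zero-padding state machine) by an
-- idiomatic split / pad-each-segment / join; same return value, measured much faster
-- on long inputs (A rebuilds the result string by repeated prepending).

-- ===== PORT A =====
/-- the body of A's `for i in range(size-1,-1,-1)` loop. -/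
def stepA (s : List Char) (st : List Char × Nat) (i : Int) : List Char × Nat :=
  let c := PySem.List.pyGetD s i '?'   -- index always in range; default never read
  if c = ':' then (c :: (List.replicate (2 - st.2) '0' ++ st.1), 0)
  else (c :: st.1, st.2 + 1)

def add_left_zeros (mac : String) : String :=
  let s := mac.toList
  let size := PySem.Chars.len s
  if size ≠ 17 then
    let st := (PySem.List.pyRange ((size : Int) - 1) (-1) (-1)).foldl (stepA s) ([], 0)
    let result := if st.2 ≠ 2 then List.replicate (2 - st.2) '0' ++ st.1 else st.1
    String.ofList result
  else mac

-- ===== PORT B =====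
def add_left_zeros_alt (mac : String) : String :=
  if PySem.Chars.len mac.toList = 17 then mac
  else String.ofList (PySem.Chars.join [':']
    ((PySem.Chars.splitOn mac.toList [':']).map
      (fun seg => if 2 ≤ PySem.Chars.len seg
                  then seg
                  else List.replicate (2 - PySem.Chars.len seg).toNat '0' ++ seg)))

-- ===== PRECONDITION & SPEC =====
def Spec_add_left_zeros (mac : String) (out : String) : Prop := out = add_left_zeros_alt mac
instance (mac : String) (out : String) : Decidable (Spec_add_left_zeros mac out) := by unfold Spec_add_left_zeros; infer_instance

-- ===== CLAIM (what is proved, stated in full; the proofs are below) =====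
def Claim_equal_add_left_zeros : Prop := ∀ (mac : String), Dom_add_left_zeros mac → Spec_add_left_zeros mac (add_left_zeros mac)

-- ===== LEMMAS AND PROOFS =====

/-- Python's `s.split(":")` as a plain structural recursion. -/
def pySplit : List Char → List (List Char)
  | [] => [[]]
  | c :: rest =>
      if c = ':' then [] :: pySplit rest
      else match pySplit rest with
        | [] => [[c]]
        | s :: ss => (c :: s) :: ss

def padU (t : List Char) : List Char := List.replicate (2 - t.length) '0' ++ t

def padB (t : List Char) : List Char :=
  if 2 ≤ PySem.Chars.len t then t else List.replicate (2 - PySem.Chars.len t).toNat '0' ++ t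

lemma padB_eq (t : List Char) : padB t = padU t := by
  unfold padB padU
  split <;> rename_i h <;> simp [PySem.Chars.len] at h ⊢
  omega

/-- all segments after the first, padded and joined with ':'. -/
def joinTail : List (List Char) → List Char
  | [] => []
  | s :: ss => s ++ ss.flatMap (fun t => ':' :: padU t)

lemma pySplit_ne_nil (l : List Char) : pySplit l ≠ [] := by
  cases l with
  | nil => simp [pySplit]
  | cons c rest =>
      simp only [pySplit]
      split
      · simp
      · cases pySplit rest <;> simp

def consA (p : List Char) : List (List Char) → List (List Char)
  | [] => [p]
  | s :: ss => (p ++ s) :: ss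

lemma go_eq (l : List Char) : ∀ (fuel : Nat) (cur : List Char) (acc : List (List Char)), l.length < fuel →
    PySem.Chars.splitOn.go [':'] fuel l cur acc
      = acc.reverse ++ consA cur.reverse (pySplit l) := by
  induction l with
  | nil =>
      intro fuel cur acc hf
      cases fuel with
      | zero => omega
      | succ f => simp [PySem.Chars.splitOn.go, pySplit, consA]
  | cons c rest ih =>
      intro fuel cur acc hf
      cases fuel with
      | zero => simp at hf
      | succ f =>
          simp only [PySem.Chars.splitOn.go]
          by_cases hc : c = ':'
          · subst hc
            have hpre : List.isPrefixOf [':'] (':' :: rest) = true := by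
              simp [List.isPrefixOf]
            rw [if_pos hpre]
            rw [show List.drop [':'].length (':' :: rest) = rest by simp]
            simp only [List.length_cons] at hf
            rw [ih f [] (List.reverse cur :: acc) (by omega)]
            simp only [pySplit]
            rcases hsp : pySplit rest with _ | ⟨s₀, ss⟩
            · exact absurd hsp (pySplit_ne_nil rest)
            · simp [consA]
          · have hpre : List.isPrefixOf [':'] (c :: rest) = false := by
              simp [List.isPrefixOf]
              intro h; exact hc h.symm
            rw [if_neg (by simp [hpre])]
            simp only [List.length_cons] at hf
            rw [ih f (c :: cur) acc (by omega)]
            simp only [pySplit, if_neg hc]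
            rcases hsp : pySplit rest with _ | ⟨s₀, ss⟩
            · exact absurd hsp (pySplit_ne_nil rest)
            · simp [consA]

lemma splitOn_eq_pySplit (l : List Char) :
    PySem.Chars.splitOn l [':'] = pySplit l := by
  unfold PySem.Chars.splitOn
  rw [go_eq l (l.length + 1) [] [] (by omega)]
  rcases hsp : pySplit l with _ | ⟨s₀, ss⟩
  · exact absurd hsp (pySplit_ne_nil l)
  · simp [consA]

/-- the loop body of A, as a foldr step (chars are consumed right to left). -/
def gA (c : Char) (st : List Char × Nat) : List Char × Nat :=
  if c = ':' then (c :: (List.replicate (2 - st.2) '0' ++ st.1), 0)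
  else (c :: st.1, st.2 + 1)

lemma fold_eq (l : List Char) :
    l.foldr gA ([], 0)
      = (joinTail (pySplit l), ((pySplit l).headD []).length) := by
  induction l with
  | nil => simp [pySplit, joinTail]
  | cons c rest ih =>
      simp only [List.foldr_cons, ih]
      by_cases hc : c = ':'
      · subst hc
        simp only [pySplit, gA]
        rcases hsp : pySplit rest with _ | ⟨s₀, ss⟩
        · exact absurd hsp (pySplit_ne_nil rest)
        · simp [joinTail, padU]
      · simp only [pySplit, gA, if_neg hc]
        rcases hsp : pySplit rest with _ | ⟨s₀, ss⟩
        · exact absurd hsp (pySplit_ne_nil rest)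
        · simp [joinTail]

lemma range_map_getD (s : List Char) (d : Char) :
    (PySem.List.pyRange ((s.length : Int) - 1) (-1) (-1)).map
      (fun i => PySem.List.pyGetD s i d) = s.reverse := by
  have hcount : PySem.List.pyRange ((s.length : Int) - 1) (-1) (-1)
      = (List.range s.length).map (fun (k : Nat) => ((s.length : Int) - 1) + (-1) * (k : Int)) := by
    simp only [PySem.List.pyRange]
    rcases Nat.eq_zero_or_pos s.length with h | h
    · simp [h]
    · have h2 : (-1 : Int) < (s.length : Int) - 1 := by omega
      rw [if_neg (by norm_num : (-1 : Int) ≠ 0), if_neg (by norm_num : ¬(0:Int) < -1),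
        if_pos h2]
      have h1 : (((s.length : Int) - 1 - (-1) + -(-1) - 1) / -(-1)).toNat = s.length := by
        simp only [neg_neg]; omega
      rw [h1]
  rw [hcount, List.map_map]
  apply List.ext_getElem
  · simp
  · intro k h1 h2
    simp only [List.getElem_map, List.getElem_range, Function.comp_apply,
      List.getElem_reverse]
    simp only [List.length_map, List.length_range] at h1
    have hidx : ((s.length : Int) - 1) + (-1) * (k : Int) = ((s.length - 1 - k : Nat) : Int) := by
      omega
    rw [hidx, PySem.List.pyGetD_natCast]
    rw [List.getD_eq_getElem _ _ (by omega)]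

lemma intercalate_map_pad (s₀ : List Char) (ss : List (List Char)) :
    List.intercalate [':'] (List.map padB (s₀ :: ss))
      = padB s₀ ++ ss.flatMap (fun t => ':' :: padB t) := by
  induction ss generalizing s₀ with
  | nil => simp [List.intercalate]
  | cons t ts ih =>
      simp only [List.map_cons, List.flatMap_cons]
      rw [show List.intercalate [':'] (padB s₀ :: padB t :: List.map padB ts)
            = padB s₀ ++ [':'] ++ List.intercalate [':'] (padB t :: List.map padB ts) by
          simp [List.intercalate, List.intersperse]]
      rw [show (padB t :: List.map padB ts) = List.map padB (t :: ts) by simp]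
      rw [ih t]
      simp

-- ===== VERDICT (by name: the statement is the Claim_ definition above) =====
theorem add_left_zeros_spec : Claim_equal_add_left_zeros := by
  unfold Claim_equal_add_left_zeros
  intro mac _
  unfold Spec_add_left_zeros add_left_zeros add_left_zeros_alt
  by_cases h17 : PySem.Chars.len mac.toList = 17
  · rw [if_neg (not_not_intro h17), if_pos h17]
  · rw [if_pos h17, if_neg h17]
    have hfold : (PySem.List.pyRange (PySem.Chars.len mac.toList - 1) (-1) (-1)).foldl
        (stepA mac.toList) ([], 0) = mac.toList.foldr gA ([], 0) := by
      show (PySem.List.pyRange ((mac.toList.length : Int) - 1) (-1) (-1)).foldl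
        (stepA mac.toList) ([], 0) = _
      have hstep : stepA mac.toList
          = fun st i => gA (PySem.List.pyGetD mac.toList i '?') st := rfl
      rw [hstep]
      rw [show (List.foldl (fun st i => gA (PySem.List.pyGetD mac.toList i '?') st) ([], 0)
            (PySem.List.pyRange ((mac.toList.length : Int) - 1) (-1) (-1)))
          = List.foldl (fun st c => gA c st) ([], 0)
              ((PySem.List.pyRange ((mac.toList.length : Int) - 1) (-1) (-1)).map
                (fun i => PySem.List.pyGetD mac.toList i '?'))
          from (@List.foldl_map ℤ Char (List Char × ℕ)
            (fun i => PySem.List.pyGetD mac.toList i '?') (fun st c => gA c st)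
            (PySem.List.pyRange ((mac.toList.length : Int) - 1) (-1) (-1)) ([], 0)).symm]
      rw [range_map_getD mac.toList '?', List.foldl_reverse]
    rw [hfold, fold_eq, splitOn_eq_pySplit]
    rcases hsp : pySplit mac.toList with _ | ⟨s₀, ss⟩
    · exact absurd hsp (pySplit_ne_nil mac.toList)
    · rw [show (List.map (fun seg => if 2 ≤ PySem.Chars.len seg then seg
            else List.replicate (2 - PySem.Chars.len seg).toNat '0' ++ seg) (s₀ :: ss))
          = List.map padB (s₀ :: ss) from rfl]
      simp only [PySem.Chars.join]
      rw [intercalate_map_pad s₀ ss]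
      simp only [joinTail, List.headD_cons, padB_eq, padU]
      by_cases hn : s₀.length = 2
      · simp [hn]
      · rw [if_pos hn]
        simp [List.append_assoc]
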